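-- pv_equiv track=rewrite | github.com/rodya-mirov/advent-of-code-2017 | days/advent02.py | advent_2_a
-- ===== SOURCE A (Python) =====
-- def advent_2_a(spreadsheet):
--     """ Determine the checksum of the given spreadsheet """
--     total = 0
--
--     for row in spreadsheet:
--         less = row[0]
--         more = row[0]
--         for i in row[1:]:
--             less = min(less, i)
--             more = max(more, i)
--
--         total += more - less
--
--     return total
-- ===== SOURCE B (Python) =====
-- def advent_2_a(spreadsheet):
--     """ Determine the checksum of the given spreadsheet """
--     return sum(s[-1] - s[0] for s in map(sorted, spreadsheet))
-- ===== Notes on version B (the rewrite author's own statement) =====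
-- stated objective: idiomatic
-- what changed: Replaces the explicit nested loop with simultaneous min/max tracking by a one-line sum over sorted rows, taking each sorted row's endpoints.
import Mathlib
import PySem

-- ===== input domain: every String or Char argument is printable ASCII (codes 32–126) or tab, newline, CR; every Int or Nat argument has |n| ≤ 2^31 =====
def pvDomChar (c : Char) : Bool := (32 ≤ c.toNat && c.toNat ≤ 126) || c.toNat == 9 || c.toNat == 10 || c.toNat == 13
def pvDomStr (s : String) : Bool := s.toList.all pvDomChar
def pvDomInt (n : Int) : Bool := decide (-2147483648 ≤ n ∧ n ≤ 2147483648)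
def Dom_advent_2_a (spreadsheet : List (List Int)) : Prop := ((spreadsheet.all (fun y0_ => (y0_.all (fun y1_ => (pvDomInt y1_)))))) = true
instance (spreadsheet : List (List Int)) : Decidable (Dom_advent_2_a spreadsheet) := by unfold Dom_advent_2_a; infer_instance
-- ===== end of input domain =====

-- B replaces A's explicit nested loop with simultaneous min/max tracking by an
-- idiomatic one-liner: sum of (sorted row)[-1] - (sorted row)[0] over the rows.

-- ===== PORT A =====
-- per-row contribution of A: less/more tracked over row[1:], starting at row[0]
def advent_2_a_row (row : List Int) : Int :=
  match PySem.List.pyGet? row 0 with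
  | none => 0   -- row[0] raises IndexError; excluded by Pre_advent_2_a
  | some r0 =>
    let lm := (PySem.List.slice row (some 1) none).foldl
      (fun (lm : Int × Int) i => (min lm.1 i, max lm.2 i)) (r0, r0)
    lm.2 - lm.1

def advent_2_a (spreadsheet : List (List Int)) : Int :=
  spreadsheet.foldl (fun total row => total + advent_2_a_row row) 0

-- ===== PORT B =====
-- per-row contribution of B: s = sorted(row); s[-1] - s[0]
def advent_2_a_alt_row (row : List Int) : Int :=
  let s := PySem.List.sorted row (fun x => x) false
  match PySem.List.pyGet? s (-1), PySem.List.pyGet? s 0 with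
  | some hi, some lo => hi - lo
  | _, _ => 0   -- s[-1] raises IndexError on an empty row; excluded by Pre_advent_2_a

def advent_2_a_alt (spreadsheet : List (List Int)) : Int :=
  (spreadsheet.map advent_2_a_alt_row).sum

-- ===== PRECONDITION & SPEC =====
-- Pre_ excludes exactly the inputs with an empty row, where A (row[0]) raises IndexError.
def Pre_advent_2_a (spreadsheet : List (List Int)) : Prop :=
  spreadsheet.all (fun row => !row.isEmpty) = true
instance (spreadsheet : List (List Int)) : Decidable (Pre_advent_2_a spreadsheet) := by
  unfold Pre_advent_2_a; infer_instance

def pvWitness_advent_2_a : List (List Int) := [[5, 1, 9, 5], [7, 5, 3], [2, 4, 6, 8]]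

def Spec_advent_2_a (spreadsheet : List (List Int)) (out : Int) : Prop := out = advent_2_a_alt spreadsheet
instance (spreadsheet : List (List Int)) (out : Int) : Decidable (Spec_advent_2_a spreadsheet out) := by unfold Spec_advent_2_a; infer_instance

-- ===== CLAIM (what is proved, stated in full; the proofs are below) =====
def Claim_equal_advent_2_a : Prop := ∀ (spreadsheet : List (List Int)), Dom_advent_2_a spreadsheet → Pre_advent_2_a spreadsheet → Spec_advent_2_a spreadsheet (advent_2_a spreadsheet)

-- ===== LEMMAS AND PROOFS =====

-- A's simultaneous pair fold is the pair of separate min- and max-folds.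
lemma pair_fold_eq (rest : List Int) : ∀ a b : Int,
    rest.foldl (fun (lm : Int × Int) i => (min lm.1 i, max lm.2 i)) (a, b)
      = (rest.foldl min a, rest.foldl max b) := by
  induction rest with
  | nil => intro a b; rfl
  | cons x t ih => intro a b; simpa [List.foldl] using ih (min a x) (max b x)

lemma foldl_min_mem (rest : List Int) : ∀ a : Int, rest.foldl min a ∈ a :: rest := by
  induction rest with
  | nil => intro a; simp
  | cons x t ih =>
    intro a
    have h := ih (min a x)
    rcases min_choice a x with hc | hc <;>
      simp only [List.foldl_cons] <;> rw [hc] at h ⊢ <;>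
      simp only [List.mem_cons] at h ⊢ <;> tauto

lemma foldl_min_le (rest : List Int) : ∀ a x : Int, x ∈ a :: rest → rest.foldl min a ≤ x := by
  induction rest with
  | nil => intro a x hx; simp at hx; simp [hx]
  | cons y t ih =>
    intro a x hx
    simp only [List.mem_cons] at hx
    rcases hx with rfl | rfl | hx
    · exact le_trans (ih _ _ List.mem_cons_self) (min_le_left _ _)
    · exact le_trans (ih _ _ List.mem_cons_self) (min_le_right _ _)
    · exact ih _ x (List.mem_cons_of_mem _ hx)

lemma foldl_max_mem (rest : List Int) : ∀ a : Int, rest.foldl max a ∈ a :: rest := by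
  induction rest with
  | nil => intro a; simp
  | cons x t ih =>
    intro a
    have h := ih (max a x)
    rcases max_choice a x with hc | hc <;>
      simp only [List.foldl_cons] <;> rw [hc] at h ⊢ <;>
      simp only [List.mem_cons] at h ⊢ <;> tauto

lemma foldl_le_max (rest : List Int) : ∀ a x : Int, x ∈ a :: rest → x ≤ rest.foldl max a := by
  induction rest with
  | nil => intro a x hx; simp at hx; simp [hx]
  | cons y t ih =>
    intro a x hx
    simp only [List.mem_cons] at hx
    rcases hx with rfl | rfl | hx
    · exact le_trans (le_max_left _ _) (ih _ _ List.mem_cons_self)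
    · exact le_trans (le_max_right _ _) (ih _ _ List.mem_cons_self)
    · exact ih _ x (List.mem_cons_of_mem _ hx)

-- the per-row values agree on a nonempty row
lemma row_eq (row : List Int) (hne : row ≠ []) :
    advent_2_a_row row = advent_2_a_alt_row row := by
  obtain ⟨r, rest, rfl⟩ := List.exists_cons_of_ne_nil hne
  set s := PySem.List.sorted (r :: rest) (fun x => x) false with hs
  have hsperm : s.Perm (r :: rest) := PySem.List.sorted_perm _ _ _
  have hslen : 0 < s.length := by
    have := hsperm.length_eq; simp [this]
  have hsne : s ≠ [] := List.ne_nil_of_length_pos hslen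
  have hmem : ∀ x, x ∈ s ↔ x ∈ r :: rest := fun x => hsperm.mem_iff
  -- every element of s lies between s[0] and s.getLast
  have hmono : ∀ (p q : Nat) (hp : p ≤ q) (hq : q < s.length), s[p]'(lt_of_le_of_lt hp hq) ≤ s[q] := by
    intro p q hp hq
    exact PySem.List.sorted_id_getElem_mono (xs := r :: rest) hp hq
  have hlo : ∀ x ∈ s, s[0] ≤ x := by
    intro x hx
    obtain ⟨q, hq, rfl⟩ := List.mem_iff_getElem.mp hx
    exact hmono 0 q (Nat.zero_le _) hq
  have hhi : ∀ x ∈ s, x ≤ s.getLast hsne := by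
    intro x hx
    obtain ⟨q, hq, rfl⟩ := List.mem_iff_getElem.mp hx
    rw [List.getLast_eq_getElem]
    exact hmono q (s.length - 1) (by omega) (by omega)
  have hA : advent_2_a_row (r :: rest)
      = rest.foldl max r - rest.foldl min r := by
    simp only [advent_2_a_row, PySem.List.pyGet?_zero_cons, PySem.List.slice_from_one,
      List.tail_cons, pair_fold_eq]
  have hmin : s[0] = rest.foldl min r := by
    apply le_antisymm
    · exact hlo _ ((hmem _).mpr (foldl_min_mem rest r))
    · exact foldl_min_le rest r _ ((hmem _).mp (List.getElem_mem hslen))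
  have hmax : s.getLast hsne = rest.foldl max r := by
    apply le_antisymm
    · exact foldl_le_max rest r _ ((hmem _).mp (List.getLast_mem hsne))
    · exact hhi _ ((hmem _).mpr (foldl_max_mem rest r))
  have hget0 : PySem.List.pyGet? s 0 = some s[0] := by
    rw [PySem.List.pyGet?_zero, List.getElem?_eq_getElem hslen]
  have hgetlast : PySem.List.pyGet? s (-1) = some (s.getLast hsne) := by
    rw [PySem.List.pyGet?_neg_one, List.getLast?_eq_some_getLast]
  simp only [advent_2_a_alt_row, ← hs, hget0, hgetlast, hA, hmin, hmax]

lemma foldl_total (l : List (List Int)) : ∀ t : Int,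
    l.foldl (fun total row => total + advent_2_a_row row) t
      = t + (l.map advent_2_a_row).sum := by
  induction l with
  | nil => intro t; simp
  | cons row rest ih =>
    intro t
    simp only [List.foldl_cons, List.map_cons, List.sum_cons, ih (t + advent_2_a_row row)]
    ring

-- ===== VERDICT (by name: the statement is the Claim_ definition above) =====
theorem advent_2_a_spec : Claim_equal_advent_2_a := by
  intro spreadsheet _hdom hpre
  unfold Spec_advent_2_a advent_2_a advent_2_a_alt
  rw [foldl_total, zero_add]
  congr 1
  refine List.map_congr_left (fun row hrow => row_eq row ?_)
  have := List.all_eq_true.mp hpre row hrow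
  simpa [List.isEmpty_iff] using this
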